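-- pv_equiv track=rewrite | github.com/szafonimateusz-mi/nuttx-vtfc | src/ntfc/lib/performance/perf_data_process.py | __split_columns
-- ===== SOURCE A (Python) =====
-- def __split_columns(body):
--     """Split columds."""
--     columns = []
--     current = []
--     depth = 0
--     for char in body:
--         if char == "(":
--             depth += 1
--         elif char == ")":
--             depth -= 1
--         if char == "," and depth == 0:
--             columns.append("".join(current).strip())
--             current = []
--         else:
--             current.append(char)
--     if current:
--         columns.append("".join(current).strip())
--     return columns
-- ===== SOURCE B (Python) =====
-- def _find_top_comma(s):
--     """Index of the first comma at parenthesis depth 0 in s, or None."""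
--     depth = 0
--     for i, c in enumerate(s):
--         if c == "(":
--             depth += 1
--         elif c == ")":
--             depth -= 1
--         if c == "," and depth == 0:
--             return i
--     return None
--
--
-- def __split_columns(body):
--     """Split columns: repeatedly cut the string at its first top-level comma."""
--     columns = []
--     while True:
--         i = _find_top_comma(body)
--         if i is None:
--             break
--         columns.append(body[:i].strip())
--         body = body[i + 1:]
--     if body:
--         columns.append(body.strip())
--     return columns
-- ===== Notes on version B (the rewrite author's own statement) =====
-- stated objective: alternative
-- what changed: A makes one pass carrying (columns, current-chars, depth) and joins the accumulated characters at each top-level comma; B instead repeatedly searches the remaining string for its first depth-0 comma with a helper and cuts the string there, recursing on the tail (correct because the depth is 0 exactly at every split point, so rescanning each remainder from depth 0 reproduces A's running depth).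
import Mathlib
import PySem

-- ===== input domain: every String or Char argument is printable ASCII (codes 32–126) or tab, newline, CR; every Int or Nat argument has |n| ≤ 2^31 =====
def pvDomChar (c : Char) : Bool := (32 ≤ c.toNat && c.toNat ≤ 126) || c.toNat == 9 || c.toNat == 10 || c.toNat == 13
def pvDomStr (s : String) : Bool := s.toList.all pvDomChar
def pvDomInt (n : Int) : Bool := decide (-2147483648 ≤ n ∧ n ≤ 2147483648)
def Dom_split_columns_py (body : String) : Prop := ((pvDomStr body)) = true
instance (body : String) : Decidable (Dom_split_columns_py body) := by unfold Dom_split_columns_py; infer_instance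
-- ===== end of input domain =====

-- B replaces A's single accumulator pass by repeated find-first-top-level-comma + cut
-- (objective: alternative decomposition, same O(n) cost).

-- ===== PORT A =====
-- one iteration of A's for-loop: state = (columns, current, depth)
def pvStepA (st : List String × List Char × Int) (c : Char) : List String × List Char × Int :=
  let depth := if c = '(' then st.2.2 + 1 else if c = ')' then st.2.2 - 1 else st.2.2
  if c = ',' ∧ depth = 0 then (st.1 ++ [String.ofList (PySem.Chars.strip st.2.1)], [], depth)
  else (st.1, st.2.1 ++ [c], depth)

def split_columns_py (body : String) : List String :=
  let st := body.toList.foldl pvStepA ([], [], 0)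
  if st.2.1 ≠ [] then st.1 ++ [String.ofList (PySem.Chars.strip st.2.1)] else st.1

-- ===== PORT B =====
-- B's helper _find_top_comma: scan with index i and running depth, return first
-- index of a comma at depth 0 (none if there is none)
def pvFind : List Char → Nat → Int → Option Nat
  | [], _, _ => none
  | c :: rest, i, depth =>
    let d := if c = '(' then depth + 1 else if c = ')' then depth - 1 else depth
    if c = ',' ∧ d = 0 then some i else pvFind rest (i + 1) d

-- needed for the port's termination: a found index means the string is nonempty
lemma pvFind_ne_nil {l : List Char} {i : Nat} {d : Int} {j : Nat}
    (h : pvFind l i d = some j) : l ≠ [] := by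
  intro e; subst e; simp [pvFind] at h

-- B's while-loop as recursion on the remaining string with the columns accumulator;
-- body[:i] / body[i+1:] are l.take i / l.drop (i+1) (i a found in-range Nat index: exact)
def pvSplitB (acc : List String) (l : List Char) : List String :=
  match h : pvFind l 0 0 with
  | some i => pvSplitB (acc ++ [String.ofList (PySem.Chars.strip (l.take i))]) (l.drop (i + 1))
  | none => if l ≠ [] then acc ++ [String.ofList (PySem.Chars.strip l)] else acc
termination_by l.length
decreasing_by
  have := pvFind_ne_nil h
  have : l.length ≠ 0 := by simpa [List.length_eq_zero_iff] using this
  simp [List.length_drop]; omega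

def split_columns_py_alt (body : String) : List String :=
  pvSplitB [] body.toList

-- ===== PRECONDITION & SPEC =====
def Spec_split_columns_py (body : String) (out : List String) : Prop := out = split_columns_py_alt body
instance (body : String) (out : List String) : Decidable (Spec_split_columns_py body out) := by unfold Spec_split_columns_py; infer_instance

-- ===== CLAIM (what is proved, stated in full; the proofs are below) =====
def Claim_equal_split_columns_py : Prop := ∀ (body : String), Dom_split_columns_py body → Spec_split_columns_py body (split_columns_py body)

-- ===== LEMMAS AND PROOFS =====

-- A's whole computation from a mid-loop state (columns cols, current cur, depth)
def pvRunA (cols : List String) (cur : List Char) (depth : Int) (l : List Char) : List String :=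
  let st := l.foldl pvStepA (cols, cur, depth)
  if st.2.1 ≠ [] then st.1 ++ [String.ofList (PySem.Chars.strip st.2.1)] else st.1

-- generalisation of pvSplitB that still carries A's pending prefix cur and depth
def pvGen (acc : List String) (cur : List Char) (depth : Int) (l : List Char) : List String :=
  match h : pvFind l 0 depth with
  | some i => pvGen (acc ++ [String.ofList (PySem.Chars.strip (cur ++ l.take i))]) [] 0 (l.drop (i + 1))
  | none => if cur ++ l ≠ [] then acc ++ [String.ofList (PySem.Chars.strip (cur ++ l))] else acc
termination_by l.length
decreasing_by
  have := pvFind_ne_nil h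
  have : l.length ≠ 0 := by simpa [List.length_eq_zero_iff] using this
  simp [List.length_drop]; omega

-- shifting the index accumulator of pvFind
lemma pvFind_shift (l : List Char) : ∀ (i : Nat) (d : Int),
    pvFind l i d = (pvFind l 0 d).map (· + i) := by
  induction l with
  | nil => intro i d; simp [pvFind]
  | cons c rest ih =>
      intro i d
      simp only [pvFind]
      by_cases hc : c = ',' ∧ (if c = '(' then d + 1 else if c = ')' then d - 1 else d) = 0
      · simp only [if_pos hc, Option.map_some]
        simp
      · rw [if_neg hc, if_neg hc, ih (i + 1), ih 1]
        cases pvFind rest 0 (if c = '(' then d + 1 else if c = ')' then d - 1 else d) with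
        | none => simp
        | some j => simp; omega

lemma pvFind_cons (c : Char) (rest : List Char) (depth : Int) :
    pvFind (c :: rest) 0 depth =
      (if c = ',' ∧ (if c = '(' then depth + 1 else if c = ')' then depth - 1 else depth) = 0 then some 0
       else (pvFind rest 0 (if c = '(' then depth + 1 else if c = ')' then depth - 1 else depth)).map (· + 1)) := by
  simp only [pvFind]
  by_cases hc : c = ',' ∧ (if c = '(' then depth + 1 else if c = ')' then depth - 1 else depth) = 0
  · rw [if_pos hc, if_pos hc]
  · rw [if_neg hc, if_neg hc, pvFind_shift rest (0 + 1)]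

-- unfold equations for pvGen / pvSplitB, phrased on the value of pvFind
lemma pvGen_some (acc : List String) (cur : List Char) (depth : Int) (l : List Char) (i : Nat)
    (h : pvFind l 0 depth = some i) :
    pvGen acc cur depth l
      = pvGen (acc ++ [String.ofList (PySem.Chars.strip (cur ++ l.take i))]) [] 0 (l.drop (i + 1)) := by
  rw [pvGen]
  split
  · next i' heq => rw [h] at heq; cases heq; rfl
  · next heq => rw [h] at heq; cases heq

lemma pvGen_none (acc : List String) (cur : List Char) (depth : Int) (l : List Char)
    (h : pvFind l 0 depth = none) :
    pvGen acc cur depth l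
      = if cur ++ l ≠ [] then acc ++ [String.ofList (PySem.Chars.strip (cur ++ l))] else acc := by
  rw [pvGen]
  split
  · next i' heq => rw [h] at heq; cases heq
  · next heq => rfl

lemma pvSplitB_some (acc : List String) (l : List Char) (i : Nat)
    (h : pvFind l 0 0 = some i) :
    pvSplitB acc l
      = pvSplitB (acc ++ [String.ofList (PySem.Chars.strip (l.take i))]) (l.drop (i + 1)) := by
  rw [pvSplitB]
  split
  · next i' heq => rw [h] at heq; cases heq; rfl
  · next heq => rw [h] at heq; cases heq

lemma pvSplitB_none (acc : List String) (l : List Char)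
    (h : pvFind l 0 0 = none) :
    pvSplitB acc l = if l ≠ [] then acc ++ [String.ofList (PySem.Chars.strip l)] else acc := by
  rw [pvSplitB]
  split
  · next i' heq => rw [h] at heq; cases heq
  · next heq => rfl

lemma pvRunA_eq_gen : ∀ (l : List Char) (cols : List String) (cur : List Char) (depth : Int),
    pvRunA cols cur depth l = pvGen cols cur depth l := by
  intro l
  induction l with
  | nil =>
      intro cols cur depth
      rw [pvGen_none _ _ _ _ rfl]
      simp only [pvRunA, List.foldl_nil, List.append_nil]
  | cons c rest ih =>
      intro cols cur depth
      by_cases hc : c = ',' ∧ (if c = '(' then depth + 1 else if c = ')' then depth - 1 else depth) = 0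
      · have hA : pvRunA cols cur depth (c :: rest)
            = pvRunA (cols ++ [String.ofList (PySem.Chars.strip cur)]) [] 0 rest := by
          simp only [pvRunA, List.foldl_cons, pvStepA]
          rw [if_pos hc, hc.2]
        have hfind : pvFind (c :: rest) 0 depth = some 0 := by
          rw [pvFind_cons, if_pos hc]
        rw [hA, ih, pvGen_some _ _ _ _ _ hfind]
        simp
      · have hA : pvRunA cols cur depth (c :: rest)
            = pvRunA cols (cur ++ [c]) (if c = '(' then depth + 1 else if c = ')' then depth - 1 else depth) rest := by
          simp only [pvRunA, List.foldl_cons, pvStepA]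
          rw [if_neg hc]
        have hfind := pvFind_cons c rest depth
        rw [if_neg hc] at hfind
        cases hf : pvFind rest 0 (if c = '(' then depth + 1 else if c = ')' then depth - 1 else depth) with
        | none =>
            rw [hf, Option.map_none] at hfind
            rw [hA, ih, pvGen_none _ _ _ _ hf, pvGen_none _ _ _ _ hfind]
            simp
        | some j =>
            rw [hf, Option.map_some] at hfind
            rw [hA, ih, pvGen_some _ _ _ _ _ hf, pvGen_some _ _ _ _ _ hfind]
            simp

lemma pvGen_eq_splitB : ∀ (n : Nat) (l : List Char), l.length ≤ n → ∀ (acc : List String),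
    pvGen acc [] 0 l = pvSplitB acc l := by
  intro n
  induction n with
  | zero =>
      intro l hl acc
      have he : l = [] := by simpa [List.length_eq_zero_iff] using Nat.le_zero.mp hl
      subst he
      rw [pvGen_none _ _ _ _ rfl, pvSplitB_none _ _ rfl]
      simp
  | succ n ih =>
      intro l hl acc
      cases hf : pvFind l 0 0 with
      | some i =>
          rw [pvGen_some _ _ _ _ _ hf, pvSplitB_some _ _ _ hf]
          simp only [List.nil_append]
          apply ih
          have h1 : l ≠ [] := pvFind_ne_nil hf
          have h2 : l.length ≠ 0 := by simpa [List.length_eq_zero_iff] using h1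
          simp only [List.length_drop]
          omega
      | none =>
          rw [pvGen_none _ _ _ _ hf, pvSplitB_none _ _ hf]
          simp

-- ===== VERDICT (by name: the statement is the Claim_ definition above) =====
theorem split_columns_py_spec : Claim_equal_split_columns_py := by
  intro body _
  unfold Spec_split_columns_py split_columns_py split_columns_py_alt
  have h1 : (let st := body.toList.foldl pvStepA ([], [], 0);
      if st.2.1 ≠ [] then st.1 ++ [String.ofList (PySem.Chars.strip st.2.1)] else st.1)
      = pvRunA [] [] 0 body.toList := rfl
  rw [h1, pvRunA_eq_gen, pvGen_eq_splitB body.toList.length body.toList le_rfl]
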